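-- pv_equiv track=rewrite | github.com/UoAsakura/Tests_for_PerfLab | task1/task1.py | calc_path
-- ===== SOURCE A (Python) =====
-- def calc_path(len_arr: int, step: int):
--     """
--     Функция для подсчёта кругового массива без его создания.
--     :param len_arr: Длина массива.
--     :param step: Длина шага.
--     :return: Список из элементов пути.
--     """
--     # Начало массива.
--     start = 1
--     # Актуальная точка, на которой мы.
--     current_position = start
--     # Результирующий путь.
--     path = []
--     # Запускаем цикл.
--     while True:
--         # Добавляем актуальную точку в путь.
--         path.append(current_position)
--         # Вычисляем новую точку.
--         current_position = (current_position + step - 1) % (len_arr)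
--         # Условие уточняющее актуальную точку.
--         if current_position == 0:
--             current_position = len_arr
--         # Завершаем, если пришли в начало.
--         if current_position == start:
--             break
--     return path
-- ===== SOURCE B (Python) =====
-- def _gcd(a, b):
--     a, b = abs(a), abs(b)
--     while b:
--         a, b = b, a % b
--     return a
--
--
-- def calc_path(len_arr: int, step: int):
--     d = step - 1
--     cycle_len = len_arr // _gcd(len_arr, d)
--     return [(i * d) % len_arr + 1 for i in range(cycle_len)]
-- ===== Notes on version B (the rewrite author's own statement) =====
-- stated objective: alternative
-- what changed: B replaces A's step-and-test simulation loop (walk positions until returning to start) with a closed form: cycle length len_arr // gcd(len_arr, step-1) and the comprehension [(i*(step-1)) % len_arr + 1 for i in range(L)].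
import Mathlib
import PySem

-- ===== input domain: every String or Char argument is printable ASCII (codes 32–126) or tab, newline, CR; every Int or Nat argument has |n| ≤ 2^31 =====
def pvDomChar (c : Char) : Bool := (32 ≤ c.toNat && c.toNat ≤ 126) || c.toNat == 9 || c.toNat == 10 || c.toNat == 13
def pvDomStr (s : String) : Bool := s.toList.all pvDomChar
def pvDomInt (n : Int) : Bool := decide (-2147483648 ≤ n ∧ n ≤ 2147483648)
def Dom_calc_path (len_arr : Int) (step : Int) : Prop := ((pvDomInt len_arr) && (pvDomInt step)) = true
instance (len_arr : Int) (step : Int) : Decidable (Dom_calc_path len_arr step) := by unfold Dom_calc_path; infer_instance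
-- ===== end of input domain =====

-- B replaces A's step-until-back-at-start simulation by the closed form: cycle length
-- len_arr // gcd(len_arr, step-1) and a comprehension over the index formula (objective: alternative algorithm).

-- ===== PORT A =====
-- Python's unbounded `while True` loop, transcribed with fuel; for len_arr ≥ 1 the loop
-- returns after at most len_arr iterations, so fuel len_arr.toNat + 1 never runs out inside Pre_.
def calcLoop (len_arr : Int) (step : Int) : Nat → Int → List Int → List Int
  | 0, _, path => path.reverse
  | fuel+1, current_position, path =>
    let path' := current_position :: path
    let c0 := PySem.Int.mod (current_position + step - 1) len_arr
    let c := if c0 = 0 then len_arr else c0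
    if c = 1 then path'.reverse else calcLoop len_arr step fuel c path'

def calc_path (len_arr : Int) (step : Int) : List Int :=
  calcLoop len_arr step (len_arr.toNat + 1) 1 []

-- ===== PORT B =====
-- hand-written Euclid loop from Source B (`while b: a, b = b, a % b` on absolute values)
def gcdLoop : Nat → Nat → Nat
  | a, 0 => a
  | a, b+1 => gcdLoop (b+1) (a % (b+1))
  termination_by a b => b
  decreasing_by exact Nat.mod_lt _ (Nat.succ_pos _)

def pyGcd (a : Int) (b : Int) : Int := (gcdLoop a.natAbs b.natAbs : Nat)

def calc_path_alt (len_arr : Int) (step : Int) : List Int :=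
  let d := step - 1
  let cycleLen := PySem.Int.floordiv len_arr (pyGcd len_arr d)
  (PySem.List.pyRange 0 cycleLen 1).map (fun i => PySem.Int.mod (i * d) len_arr + 1)

-- ===== PRECONDITION & SPEC =====
-- A raises ZeroDivisionError for len_arr = 0 and loops forever for len_arr < 0
-- (positions are then ≤ 0 and never equal the start 1), so Pre_ is len_arr ≥ 1.
def Pre_calc_path (len_arr : Int) (step : Int) : Prop := 1 ≤ len_arr
instance (len_arr : Int) (step : Int) : Decidable (Pre_calc_path len_arr step) := by unfold Pre_calc_path; infer_instance
def pvWitness_calc_path : Int × Int := (5, 3)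

def Spec_calc_path (len_arr : Int) (step : Int) (out : List Int) : Prop := out = calc_path_alt len_arr step
instance (len_arr : Int) (step : Int) (out : List Int) : Decidable (Spec_calc_path len_arr step out) := by unfold Spec_calc_path; infer_instance

-- ===== CLAIM (what is proved, stated in full; the proofs are below) =====
def Claim_equal_calc_path : Prop := ∀ (len_arr : Int) (step : Int), Dom_calc_path len_arr step → Pre_calc_path len_arr step → Spec_calc_path len_arr step (calc_path len_arr step)

-- ===== LEMMAS AND PROOFS =====

-- Source B's Euclid loop computes Nat.gcd (arguments swapped)
theorem gcdLoop_eq (a b : Nat) : gcdLoop a b = Nat.gcd b a := by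
  induction b using Nat.strong_induction_on generalizing a with
  | _ b ih =>
    cases b with
    | zero => simp [gcdLoop]
    | succ b =>
      rw [gcdLoop, ih _ (Nat.mod_lt _ (Nat.succ_pos b)), Nat.gcd_succ]

-- the position visited at step i (0-based), for modulus n and increment d = step - 1
def pvPos (n : Int) (d : Int) (i : Nat) : Int := PySem.Int.mod ((i : Int) * d) n + 1

-- divisibility characterisation of returning to the start
theorem pvDvd_iff (n : Int) (d : Int) (hn : 1 ≤ n) (k : Nat) :
    n ∣ (k : Int) * d ↔ (n.toNat / Nat.gcd n.toNat d.natAbs) ∣ k := by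
  set N := n.toNat with hN
  have hn' : n = (N : Int) := by omega
  set D := d.natAbs with hD
  set g := Nat.gcd N D with hg
  have hNpos : 0 < N := by omega
  have hgpos : 0 < g := Nat.gcd_pos_of_pos_left D hNpos
  have hgN : g ∣ N := Nat.gcd_dvd_left N D
  have hgD : g ∣ D := Nat.gcd_dvd_right N D
  have key : N ∣ k * D ↔ (N / g) ∣ k := by
    constructor
    · intro h
      have hco : Nat.Coprime (N / g) (D / g) := Nat.coprime_div_gcd_div_gcd hgpos
      have h1 : g * (N / g) ∣ g * (k * (D / g)) := by
        have e1 : g * (N / g) = N := Nat.mul_div_cancel' hgN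
        have e2 : g * (k * (D / g)) = k * D := by
          rw [mul_comm g (k * (D / g)), mul_assoc, Nat.div_mul_cancel hgD]
        rw [e1, e2]; exact h
      have h2 : (N / g) ∣ k * (D / g) := (Nat.mul_dvd_mul_iff_left hgpos).mp h1
      exact hco.dvd_of_dvd_mul_right h2
    · intro h
      have e1 : N = (N / g) * g := (Nat.div_mul_cancel hgN).symm
      have e2 : k * D = (k * (D / g)) * g := by
        rw [mul_assoc, Nat.div_mul_cancel hgD]
      rw [e1, e2]
      exact Nat.mul_dvd_mul (dvd_trans h (Dvd.intro _ rfl)) dvd_rfl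
  have habs : n ∣ (k : Int) * d ↔ N ∣ k * D := by
    rw [hn', ← Int.natAbs_dvd_natAbs, Int.natAbs_natCast, Int.natAbs_mul, Int.natAbs_natCast, hD]
  rw [habs, key]

theorem pvPos_succ (n step : Int) (hn : 1 ≤ n) (i : Nat) :
    (if PySem.Int.mod (pvPos n (step-1) i + step - 1) n = 0 then n
     else PySem.Int.mod (pvPos n (step-1) i + step - 1) n) = pvPos n (step-1) (i+1) := by
  have hpos : (0:Int) < n := by omega
  unfold pvPos
  rw [PySem.Int.mod_eq_emod_of_pos hpos, PySem.Int.mod_eq_emod_of_pos hpos,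
      PySem.Int.mod_eq_emod_of_pos hpos]
  set d := step - 1 with hd
  have hcast : (((i+1 : Nat)) : Int) = (i : Int) + 1 := by push_cast; ring
  rw [hcast]
  set r := ((i:Int) + 1) * d % n with hr
  have harg : (i : Int) * d % n + 1 + step - 1 = (i : Int) * d % n + (d + 1) := by
    rw [hd]; ring
  rw [harg]
  have h1 : ((i:Int)*d % n + (d+1)) % n = ((i:Int)*d + (d+1)) % n :=
    Int.ModEq.add_right (d+1) (Int.emod_emod_of_dvd _ dvd_rfl)
  have h2 : (r + 1) % n = (((i:Int)+1)*d + 1) % n :=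
    Int.ModEq.add_right 1 (Int.emod_emod_of_dvd _ dvd_rfl)
  have key : ((i:Int)*d % n + (d+1)) % n = (r + 1) % n := by
    rw [h1, h2]; congr 1; ring
  rw [key]
  have hr0 : 0 ≤ r := Int.emod_nonneg _ (by omega)
  have hrlt : r < n := Int.emod_lt_of_pos _ hpos
  by_cases hcase : r + 1 = n
  · rw [hcase, Int.emod_self]
    simp
  · have hlt : (r + 1) % n = r + 1 := Int.emod_eq_of_lt (by omega) (by omega)
    rw [hlt]
    have hne : ¬ (r + 1 = 0) := by omega
    simp [hne]

theorem pvPos_eq_one_iff (n d : Int) (hn : 1 ≤ n) (k : Nat) :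
    pvPos n d k = 1 ↔ (n.toNat / Nat.gcd n.toNat d.natAbs) ∣ k := by
  have hpos : (0:Int) < n := by omega
  unfold pvPos
  rw [PySem.Int.mod_eq_emod_of_pos hpos, ← pvDvd_iff n d hn k]
  constructor
  · intro h
    have : (k : Int) * d % n = 0 := by omega
    exact Int.dvd_of_emod_eq_zero this
  · intro h
    rw [Int.emod_eq_zero_of_dvd h]
    norm_num

theorem loop_inv (n step : Int) (hn : 1 ≤ n)
    (L : Nat) (hL : L = n.toNat / Nat.gcd n.toNat (step-1).natAbs)
    (f i : Nat) (acc : List Int) (hi : i < L) (hf : L - i ≤ f)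
    (hacc : acc = ((List.range i).map (pvPos n (step-1))).reverse) :
    calcLoop n step f (pvPos n (step-1) i) acc = (List.range L).map (pvPos n (step-1)) := by
  induction f generalizing i acc with
  | zero => omega
  | succ f ih =>
    simp only [calcLoop]
    rw [pvPos_succ n step hn i]
    have hiff := pvPos_eq_one_iff n (step-1) hn (i+1)
    rw [← hL] at hiff
    by_cases hone : pvPos n (step-1) (i+1) = 1
    · have hdvd : L ∣ (i+1) := hiff.mp hone
      have hLe : L ≤ i + 1 := Nat.le_of_dvd (Nat.succ_pos i) hdvd
      have hEq : i + 1 = L := by omega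
      rw [if_pos hone, hacc]
      have hrev : (pvPos n (step-1) i :: (List.map (pvPos n (step-1)) (List.range i)).reverse).reverse
           = List.map (pvPos n (step-1)) (List.range (i+1)) := by
        rw [List.range_succ, List.map_append]
        simp
      rw [hrev, hEq]
    · rw [if_neg hone]
      have hne : i + 1 ≠ L := by
        intro hEq
        exact hone (hiff.mpr (hEq ▸ dvd_rfl))
      apply ih (i+1)
      · omega
      · omega
      · rw [hacc, List.range_succ, List.map_append, List.reverse_append]
        simp

-- ===== VERDICT (by name: the statement is the Claim_ definition above) =====
theorem calc_path_spec : Claim_equal_calc_path := by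
  intro n step _ hpre
  unfold Pre_calc_path at hpre
  unfold Spec_calc_path calc_path calc_path_alt
  dsimp only
  set d := step - 1 with hd
  set g := Nat.gcd n.toNat d.natAbs with hg
  set L := n.toNat / g with hL
  have hNpos : 0 < n.toNat := by omega
  have hgpos : 0 < g := Nat.gcd_pos_of_pos_left _ hNpos
  have hLpos : 0 < L := Nat.div_pos (Nat.le_of_dvd hNpos (Nat.gcd_dvd_left _ _)) hgpos
  have hLle : L ≤ n.toNat := Nat.div_le_self _ _
  -- B side
  have hgcd : pyGcd n d = (g : Int) := by
    unfold pyGcd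
    rw [gcdLoop_eq, Nat.gcd_comm]
    congr 2
    omega
  have hn' : n = ((n.toNat : Nat) : Int) := by omega
  have hfloor : PySem.Int.floordiv n ((g:Nat) : Int) = ((L : Nat) : Int) := by
    rw [hn', hL]
    exact_mod_cast PySem.Int.floordiv_natCast n.toNat g
  rw [hgcd, hfloor, PySem.List.pyRange_zero_nat, List.map_map]
  have hB : ((fun i => PySem.Int.mod (i * d) n + 1) ∘ (fun k : Nat => (k : Int))) = pvPos n d := by
    funext k
    simp [pvPos]
  rw [hB]
  -- A side
  have hstart : (1 : Int) = pvPos n d 0 := by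
    have hpos : (0:Int) < n := by omega
    unfold pvPos
    rw [PySem.Int.mod_eq_emod_of_pos hpos]
    simp
  rw [hstart]
  exact loop_inv n step hpre L (by rw [hL, hg, hd]) (n.toNat + 1) 0 [] hLpos (by omega) (by simp)
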